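-- pv_equiv track=rewrite | github.com/Olabits-Dev/MT5-Saas-MultiClient-Intraday-Bot | symbol_utils.py | _best_candidate
-- ===== SOURCE A (Python) =====
-- def _best_candidate(base: str, names: set[str]) -> str | None:
--     """
--     Picks the best broker symbol candidate for a given base symbol.
--     """
--
--     # 1) Exact match
--     if base in names:
--         return base
--
--     # 2) Common suffix match: EURUSDm, EURUSD.i, EURUSD-ECN
--     starts = [n for n in names if n.startswith(base)]
--     if starts:
--         starts.sort(key=len)
--         return starts[0]
--
--     # 3) Some brokers use separators: EURUSD.m, EURUSD_i, EURUSD# etc.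
--     sep_candidates = [
--         n for n in names
--         if n.replace(".", "").replace("_", "").replace("-", "").startswith(base)
--     ]
--     if sep_candidates:
--         sep_candidates.sort(key=len)
--         return sep_candidates[0]
--
--     # 4) Very rare: base occurs in middle (prefix added)
--     contains = [n for n in names if base in n]
--     if contains:
--         contains.sort(key=len)
--         return contains[0]
--
--     return None
-- ===== SOURCE B (Python) =====
-- def _best_candidate(base: str, names: set[str]) -> str | None:
--     """
--     Picks the best broker symbol candidate for a given base symbol.
--     One pass over names keeping a 'best so far' slot per match tier.
--     """
--
--     def better(n, cur):
--         return cur is None or len(n) < len(cur)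
--
--     exact = prefix = stripped = inside = None
--     for n in names:
--         if exact is None and n == base:
--             exact = n
--         if n.startswith(base) and better(n, prefix):
--             prefix = n
--         if n.replace(".", "").replace("_", "").replace("-", "").startswith(base) and better(n, stripped):
--             stripped = n
--         if base in n and better(n, inside):
--             inside = n
--     if exact is not None:
--         return exact
--     if prefix is not None:
--         return prefix
--     if stripped is not None:
--         return stripped
--     return inside
-- ===== Notes on version B (the rewrite author's own statement) =====
-- stated objective: simpler
-- what changed: Replaces A's four separate filter-then-stable-sort passes by a single pass over the names that keeps one shortest-so-far slot per match tier and returns the highest-priority non-empty slot.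
import Mathlib
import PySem

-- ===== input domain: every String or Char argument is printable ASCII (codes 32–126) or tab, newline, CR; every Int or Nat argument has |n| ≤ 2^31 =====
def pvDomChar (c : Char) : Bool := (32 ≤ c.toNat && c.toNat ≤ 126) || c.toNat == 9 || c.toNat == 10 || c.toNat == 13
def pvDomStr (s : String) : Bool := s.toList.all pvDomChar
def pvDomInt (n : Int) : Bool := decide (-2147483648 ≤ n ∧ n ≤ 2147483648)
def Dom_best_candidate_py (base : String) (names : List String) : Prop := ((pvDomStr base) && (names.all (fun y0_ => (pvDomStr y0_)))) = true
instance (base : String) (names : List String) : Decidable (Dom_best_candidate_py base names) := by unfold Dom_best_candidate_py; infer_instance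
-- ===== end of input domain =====

-- B replaces A's four filter-then-stable-sort passes by a single pass over the names
-- keeping one shortest-so-far slot per match tier (objective: simpler, one traversal).
-- The equivalence is about the RETURN value for the names presented in list order.

-- ===== PORT A =====
def best_candidate_py (base : String) (names : List String) : Option String :=
  -- 1) Exact match
  if names.contains base then some base
  else
    -- 2) Common suffix match
    let starts := names.filter (fun n => PySem.Str.startswith n base)
    if starts ≠ [] then
      (PySem.List.sorted starts (fun s => PySem.Str.len s)).head?   -- starts.sort(key=len); starts[0]
    else
      -- 3) Separator-stripped prefix match
      let sep_candidates := names.filter (fun n =>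
        PySem.Str.startswith (PySem.Str.replace (PySem.Str.replace (PySem.Str.replace n "." "") "_" "") "-" "") base)
      if sep_candidates ≠ [] then
        (PySem.List.sorted sep_candidates (fun s => PySem.Str.len s)).head?
      else
        -- 4) base occurs somewhere inside
        let contains := names.filter (fun n => PySem.Str.isIn base n)
        if contains ≠ [] then
          (PySem.List.sorted contains (fun s => PySem.Str.len s)).head?
        else
          none

-- ===== PORT B =====
-- better(n, cur): cur is None or len(n) < len(cur)
def bcBetter (n : String) (cur : Option String) : Bool :=
  match cur with
  | none => true
  | some a => PySem.Str.len n < PySem.Str.len a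

-- one loop body: update the four slots (exact, prefix, stripped, inside)
def bcStep (base : String)
    (st : Option String × Option String × Option String × Option String) (n : String) :
    Option String × Option String × Option String × Option String :=
  (if st.1.isNone && n == base then some n else st.1,
   if PySem.Str.startswith n base && bcBetter n st.2.1 then some n else st.2.1,
   if PySem.Str.startswith (PySem.Str.replace (PySem.Str.replace (PySem.Str.replace n "." "") "_" "") "-" "") base
      && bcBetter n st.2.2.1 then some n else st.2.2.1,
   if PySem.Str.isIn base n && bcBetter n st.2.2.2 then some n else st.2.2.2)

def best_candidate_py_alt (base : String) (names : List String) : Option String :=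
  let st := names.foldl (bcStep base) (none, none, none, none)
  match st.1 with
  | some e => some e
  | none =>
    match st.2.1 with
    | some p => some p
    | none =>
      match st.2.2.1 with
      | some s => some s
      | none => st.2.2.2

-- ===== PRECONDITION & SPEC =====
def Spec_best_candidate_py (base : String) (names : List String) (out : Option String) : Prop := out = best_candidate_py_alt base names
instance (base : String) (names : List String) (out : Option String) : Decidable (Spec_best_candidate_py base names out) := by unfold Spec_best_candidate_py; infer_instance

-- ===== CLAIM (what is proved, stated in full; the proofs are below) =====
def Claim_equal_best_candidate_py : Prop := ∀ (base : String) (names : List String), Dom_best_candidate_py base names → Spec_best_candidate_py base names (best_candidate_py base names)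

-- ===== LEMMAS AND PROOFS =====

-- single-slot update functions (the components of bcStep)
def updE (base : String) (o : Option String) (n : String) : Option String :=
  if o.isNone && n == base then some n else o
def updQ (q : String → Bool) (o : Option String) (n : String) : Option String :=
  if q n && bcBetter n o then some n else o
-- first element of minimal length, computed left to right
def fstep (o : Option String) (n : String) : Option String :=
  match o with
  | none => some n
  | some a => if PySem.Str.len n < PySem.Str.len a then some n else o

theorem fold4 (base : String) (l : List String)
    (st : Option String × Option String × Option String × Option String) :
    l.foldl (bcStep base) st =
      (l.foldl (updE base) st.1,
       l.foldl (updQ (fun n => PySem.Str.startswith n base)) st.2.1,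
       l.foldl (updQ (fun n =>
         PySem.Str.startswith (PySem.Str.replace (PySem.Str.replace (PySem.Str.replace n "." "") "_" "") "-" "") base)) st.2.2.1,
       l.foldl (updQ (fun n => PySem.Str.isIn base n)) st.2.2.2) := by
  induction l generalizing st with
  | nil => rfl
  | cons n l ih => simpa [List.foldl, bcStep, updE, updQ] using ih (bcStep base st n)

theorem updQ_eq_fstep (q : String → Bool) (o : Option String) (n : String) (h : q n = true) :
    updQ q o n = fstep o n := by
  cases o <;> simp [updQ, fstep, bcBetter, h]

theorem foldl_updQ (q : String → Bool) (l : List String) (o : Option String) :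
    l.foldl (updQ q) o = (l.filter q).foldl fstep o := by
  induction l generalizing o with
  | nil => rfl
  | cons n l ih =>
    by_cases h : q n = true
    · simp [List.foldl, List.filter, h, updQ_eq_fstep q o n h, ih]
    · simp at h
      simp [List.foldl, List.filter, h, updQ, ih]

theorem foldl_updE_some (base x : String) (l : List String) :
    l.foldl (updE base) (some x) = some x := by
  induction l with
  | nil => rfl
  | cons n l ih => simpa [List.foldl, updE] using ih

theorem foldl_updE_none (base : String) (l : List String) :
    l.foldl (updE base) none = if l.contains base then some base else none := by
  induction l with
  | nil => rfl
  | cons n l ih =>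
    by_cases h : n = base
    · subst h
      simp [List.foldl, updE, foldl_updE_some]
    · have hb : (n == base) = false := by simp [h]
      simp [List.foldl, updE, hb, Ne.symm h, ih]

theorem fstep_some_isSome (l : List String) (a : String) :
    (l.foldl fstep (some a)).isSome = true := by
  induction l generalizing a with
  | nil => rfl
  | cons n l ih =>
    simp only [List.foldl, fstep]
    split <;> exact ih _

theorem foldl_fstep_none_eq_none_iff (l : List String) :
    l.foldl fstep none = none ↔ l = [] := by
  cases l with
  | nil => simp
  | cons n l =>
    simp only [List.foldl, fstep]
    constructor
    · intro h
      have := fstep_some_isSome l n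
      rw [h] at this
      simp at this
    · intro h; cases h

theorem head_insertBy_len (x : String) (acc : List String) :
    (PySem.List.insertBy (fun a b => decide (PySem.Str.len a < PySem.Str.len b)) x acc).head? =
      fstep acc.head? x := by
  cases acc with
  | nil => rfl
  | cons y ys =>
    by_cases h : x.length < y.length
    · simp [PySem.List.insertBy, fstep, h]
    · simp [PySem.List.insertBy, fstep, h]

theorem foldl_insertBy_head (l : List String) (acc : List String) :
    (l.foldl (fun acc x => PySem.List.insertBy (fun a b => decide (PySem.Str.len a < PySem.Str.len b)) x acc) acc).head? =
      l.foldl fstep acc.head? := by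
  induction l generalizing acc with
  | nil => rfl
  | cons n l ih =>
    simp only [List.foldl]
    rw [ih, head_insertBy_len]

theorem sorted_len_head (l : List String) :
    (PySem.List.sorted l (fun s => PySem.Str.len s)).head? = l.foldl fstep none := by
  rw [PySem.List.sorted_eq_foldl_insertBy]
  simpa using foldl_insertBy_head l []

-- ===== VERDICT (by name: the statement is the Claim_ definition above) =====
theorem best_candidate_py_spec : Claim_equal_best_candidate_py := by
  intro base names _
  unfold Spec_best_candidate_py best_candidate_py best_candidate_py_alt
  rw [fold4]
  simp only [foldl_updE_none, foldl_updQ, sorted_len_head]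
  by_cases hx : names.contains base = true
  · have hm : base ∈ names := by simpa using hx
    simp [hm]
  · have hm : base ∉ names := by simpa using hx
    simp only [List.contains_eq_mem, hm, decide_false, Bool.false_eq_true, if_false]
    by_cases hp : names.filter (fun n => PySem.Str.startswith n base) = []
    · rw [hp]
      by_cases hs : names.filter (fun n =>
          PySem.Str.startswith (PySem.Str.replace (PySem.Str.replace (PySem.Str.replace n "." "") "_" "") "-" "") base) = []
      · rw [hs]
        by_cases hc : names.filter (fun n => PySem.Str.isIn base n) = []
        · rw [hc]; simp
        · have : (names.filter (fun n => PySem.Str.isIn base n)).foldl fstep none ≠ none :=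
            fun h => hc ((foldl_fstep_none_eq_none_iff _).1 h)
          obtain ⟨c0, hc0⟩ := Option.ne_none_iff_exists'.1 this
          rw [hc0]; simp_all
      · have : (names.filter (fun n =>
            PySem.Str.startswith (PySem.Str.replace (PySem.Str.replace (PySem.Str.replace n "." "") "_" "") "-" "") base)).foldl fstep none ≠ none :=
          fun h => hs ((foldl_fstep_none_eq_none_iff _).1 h)
        obtain ⟨s0, hs0⟩ := Option.ne_none_iff_exists'.1 this
        rw [hs0]; simp_all
    · have : (names.filter (fun n => PySem.Str.startswith n base)).foldl fstep none ≠ none :=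
        fun h => hp ((foldl_fstep_none_eq_none_iff _).1 h)
      obtain ⟨p0, hp0⟩ := Option.ne_none_iff_exists'.1 this
      rw [hp0]; simp_all
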